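-- pv_equiv track=rewrite | github.com/blazery/CaptainSonarBot | Move.py | cleanRestraints
-- ===== SOURCE A (Python) =====
-- def cleanRestraints(list):
--     tempRestraints = [];
--
--     for item in list:
--         if item not in tempRestraints:
--             tempRestraints.append(item);
--         else:
--             tempRestraints.remove(item);
--     return tempRestraints;
-- ===== SOURCE B (Python) =====
-- def cleanRestraints(list):
--     # Count-parity table + single reverse scan keeping last occurrences of odd-count items.
--     parity = {}
--     for item in list:
--         parity[item] = not parity.get(item, False)
--     out = []
--     seen = set()
--     for item in reversed(list):
--         if item not in seen:
--             seen.add(item)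
--             if parity[item]:
--                 out.append(item)
--     out.reverse()
--     return out
-- ===== Notes on version B (the rewrite author's own statement) =====
-- stated objective: faster
-- what changed: Replaces the toggle simulation (membership test and remove on the growing output list per element) with a parity dict built in one pass plus a reverse scan with a seen set, keeping odd-count elements ordered by last occurrence.
import Mathlib
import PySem

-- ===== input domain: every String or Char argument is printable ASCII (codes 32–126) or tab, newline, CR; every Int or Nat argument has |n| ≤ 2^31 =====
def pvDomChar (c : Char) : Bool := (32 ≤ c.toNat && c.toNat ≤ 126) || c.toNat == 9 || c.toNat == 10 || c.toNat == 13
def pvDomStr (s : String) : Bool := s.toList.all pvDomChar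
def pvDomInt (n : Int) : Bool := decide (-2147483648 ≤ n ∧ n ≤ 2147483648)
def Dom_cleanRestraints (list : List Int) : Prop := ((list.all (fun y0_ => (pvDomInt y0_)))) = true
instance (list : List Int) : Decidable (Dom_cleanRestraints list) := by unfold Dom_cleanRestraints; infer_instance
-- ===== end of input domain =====

-- B replaces A's quadratic toggle simulation (membership test + remove on the growing
-- result per element) with a parity dict built in one pass plus a reverse scan with a
-- seen set; objective: faster.


-- ===== PORT A =====
def cleanRestraints (list : List Int) : List Int :=
  list.foldl (fun tempRestraints item =>
    if item ∉ tempRestraints then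
      tempRestraints ++ [item]
    else
      -- item ∈ tempRestraints, so Python's list.remove cannot raise here
      (PySem.List.remove? tempRestraints item).getD tempRestraints) []

-- ===== PORT B =====
def cleanRestraints_alt (list : List Int) : List Int :=
  let parity : PySem.Dict Int Bool :=
    list.foldl (fun d item => d.insert item (!(d.getD item false))) PySem.Dict.empty
  let st :=
    list.reverse.foldl (fun (st : List Int × PySem.Set Int) item =>
      if PySem.Set.contains st.2 item then st
      else ((if parity.getD item false then st.1 ++ [item] else st.1),
            PySem.Set.add st.2 item))
      ([], PySem.Set.empty)
  st.1.reverse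

-- ===== PRECONDITION & SPEC =====
def Spec_cleanRestraints (list : List Int) (out : List Int) : Prop := out = cleanRestraints_alt list
instance (list : List Int) (out : List Int) : Decidable (Spec_cleanRestraints list out) := by unfold Spec_cleanRestraints; infer_instance

-- ===== CLAIM (what is proved, stated in full; the proofs are below) =====
def Claim_equal_cleanRestraints : Prop := ∀ (list : List Int), Dom_cleanRestraints list → Spec_cleanRestraints list (cleanRestraints list)

-- ===== LEMMAS AND PROOFS =====

-- Common specification: elements with odd multiplicity, ordered by last occurrence.
def pvSpec (l : List Int) : List Int :=
  l.dedup.filter (fun y => decide (l.count y % 2 = 1))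

theorem pv_contains_eq (s : PySem.Set Int) (y : Int) :
    PySem.Set.contains s y = decide (y ∈ s) := by
  simp [PySem.Set.contains, List.contains_eq_mem]

-- Mathlib's List.dedup keeps LAST occurrences; appending x moves x's kept copy to the end.
theorem pv_dedup_append_singleton (l : List Int) (x : Int) :
    (l ++ [x]).dedup = l.dedup.filter (fun y => y ≠ x) ++ [x] := by
  induction l with
  | nil => simp
  | cons a l ih =>
    by_cases hax : a = x
    · subst hax
      rw [List.cons_append, List.dedup_cons_of_mem (by simp), ih]
      by_cases ha : a ∈ l
      · rw [List.dedup_cons_of_mem ha]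
      · rw [List.dedup_cons_of_notMem ha]
        simp
    · by_cases ha : a ∈ l
      · rw [List.cons_append, List.dedup_cons_of_mem (by simp [ha]),
          List.dedup_cons_of_mem ha, ih]
      · rw [List.cons_append, List.dedup_cons_of_notMem (by simp [ha, hax]),
          List.dedup_cons_of_notMem ha, ih]
        simp [hax]

theorem pv_mem_spec (l : List Int) (x : Int) :
    x ∈ pvSpec l ↔ l.count x % 2 = 1 := by
  constructor
  · intro h
    simpa using (List.of_mem_filter h)
  · intro h
    refine List.mem_filter.mpr ⟨List.mem_dedup.mpr ?_, by simpa using h⟩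
    exact List.count_pos_iff.mp (by omega)

theorem pv_spec_append_singleton (l : List Int) (x : Int) :
    pvSpec (l ++ [x]) =
      (if x ∉ pvSpec l then pvSpec l ++ [x]
       else (pvSpec l).filter (fun y => y != x)) := by
  have hcnt : ∀ y : Int, (l ++ [x]).count y = l.count y + (if y = x then 1 else 0) := by
    intro y
    rw [List.count_append]
    congr 1
    by_cases h : y = x
    · subst h; simp
    · rw [if_neg h]
      simp [Ne.symm h]
  by_cases hodd : l.count x % 2 = 1
  · have hx : x ∈ pvSpec l := (pv_mem_spec l x).mpr hodd
    rw [if_neg (not_not_intro hx)]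
    have h1 : List.filter (fun y => decide ((l ++ [x]).count y % 2 = 1)) [x] = [] := by
      have h2 : ¬ ((l.count x + 1) % 2 = 1) := by omega
      simp [h2]
    unfold pvSpec
    rw [pv_dedup_append_singleton, List.filter_append, List.filter_filter, h1,
      List.append_nil, List.filter_filter]
    apply List.filter_congr
    intro y _
    by_cases hyx : y = x
    · subst hyx
      have h2 : ¬ ((l.count y + 1) % 2 = 1) := by omega
      simp [hcnt y, h2, hodd]
    · simp [hyx, hcnt y]
  · have hx : x ∉ pvSpec l := fun h => hodd ((pv_mem_spec l x).mp h)
    rw [if_pos hx]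
    have h1 : List.filter (fun y => decide ((l ++ [x]).count y % 2 = 1)) [x] = [x] := by
      have h2 : (l.count x + 1) % 2 = 1 := by omega
      simp [h2]
    unfold pvSpec
    rw [pv_dedup_append_singleton, List.filter_append, List.filter_filter, h1]
    congr 1
    apply List.filter_congr
    intro y _
    by_cases hyx : y = x
    · subst hyx
      simp [hodd]
    · simp [hyx, hcnt y]

theorem pv_spec_nodup (l : List Int) : (pvSpec l).Nodup :=
  List.Nodup.filter _ l.nodup_dedup

-- ---- A equals the specification ----
theorem pvA_eq_spec (l : List Int) : cleanRestraints l = pvSpec l := by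
  induction l using List.reverseRecOn with
  | nil => simp [cleanRestraints, pvSpec]
  | append_singleton l x ih =>
    unfold cleanRestraints at ih ⊢
    rw [List.foldl_append, List.foldl_cons, List.foldl_nil, ih,
      pv_spec_append_singleton]
    by_cases hx : x ∈ pvSpec l
    · simp only [hx, not_true_eq_false, if_false]
      rw [PySem.List.remove?_eq_some_erase _ x hx, Option.getD_some,
        (pv_spec_nodup l).erase_eq_filter]
    · simp [hx]

-- ---- B equals the specification ----

-- the parity dict: getD reads off the running parity of the count
theorem pv_parity_getD (l : List Int) (d : PySem.Dict Int Bool) (x : Int) :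
    (l.foldl (fun d item => d.insert item (!(d.getD item false))) d).getD x false
      = xor (decide (l.count x % 2 = 1)) (d.getD x false) := by
  induction l generalizing d with
  | nil => simp
  | cons a l ih =>
    rw [List.foldl_cons, ih]
    by_cases hxa : x = a
    · subst hxa
      rw [PySem.Dict.getD_insert]
      simp only [List.count_cons_self]
      rcases Nat.even_or_odd (l.count x) with h | h
      · have h2 : l.count x % 2 = 0 := Nat.even_iff.mp h
        have h3 : (l.count x + 1) % 2 = 1 := by omega
        simp [h2, h3]
      · have h2 : l.count x % 2 = 1 := Nat.odd_iff.mp h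
        have h3 : ¬ ((l.count x + 1) % 2 = 1) := by omega
        simp [h2, h3]
    · rw [PySem.Dict.getD_insert, if_neg hxa]
      have hax : ¬ a = x := fun h => hxa h.symm
      simp [hax]

-- the reverse scan, as a pure recursion (PySem.Set Int is a duplicate-free List Int)
def pvCollect (p : Int → Bool) : List Int → PySem.Set Int → List Int
  | [], _ => []
  | x :: r, s =>
      if PySem.Set.contains s x then pvCollect p r s
      else (if p x then [x] else []) ++ pvCollect p r (PySem.Set.add s x)

theorem pv_foldl_collect (p : Int → Bool) (r : List Int) (out : List Int) (s : PySem.Set Int) :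
    (r.foldl (fun (st : List Int × PySem.Set Int) item =>
        if PySem.Set.contains st.2 item then st
        else ((if p item then st.1 ++ [item] else st.1), PySem.Set.add st.2 item))
      (out, s)).1 = out ++ pvCollect p r s := by
  induction r generalizing out s with
  | nil => simp [pvCollect]
  | cons x r ih =>
    rw [List.foldl_cons]
    unfold pvCollect
    by_cases hx : PySem.Set.contains s x
    · rw [if_pos hx, if_pos hx, ih]
    · rw [if_neg hx, if_neg hx]
      by_cases hp : p x
      · rw [if_pos hp, if_pos hp, ih, List.append_assoc, List.singleton_append]
      · rw [if_neg hp, if_neg hp, ih, List.nil_append]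

theorem pv_collect_eq (p : Int → Bool) (r : List Int) (s : PySem.Set Int) :
    pvCollect p r s
      = ((r.reverse.dedup).filter (fun y => !(PySem.Set.contains s y) && p y)).reverse := by
  induction r generalizing s with
  | nil => simp [pvCollect]
  | cons x r ih =>
    have hrev : (x :: r).reverse = r.reverse ++ [x] := by simp
    rw [hrev, pv_dedup_append_singleton, List.filter_append, List.filter_filter]
    unfold pvCollect
    by_cases hx : x ∈ s
    · have hcx : PySem.Set.contains s x = true := by
        rw [pv_contains_eq]; exact decide_eq_true hx
      rw [if_pos hcx, ih]
      have h1 : List.filter (fun y => !PySem.Set.contains s y && p y) [x] = [] := by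
        simp [hx]
      have h2 : ∀ y ∈ r.reverse.dedup,
          (!PySem.Set.contains s y && p y && decide (y ≠ x))
            = (!PySem.Set.contains s y && p y) := by
        intro y _
        by_cases hyx : y = x
        · subst hyx; simp [hx]
        · simp [hyx]
      rw [h1, List.append_nil, List.filter_congr h2]
    · have hcx : PySem.Set.contains s x = false := by
        rw [pv_contains_eq]; exact decide_eq_false hx
      rw [if_neg (by rw [hcx]; exact Bool.false_ne_true), ih (PySem.Set.add s x)]
      have hadd : PySem.Set.add s x = s ++ [x] := by
        rw [PySem.Set.add, if_neg (by rw [pv_contains_eq]; simpa using hx)]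
      have h2 : ∀ y ∈ r.reverse.dedup,
          (!PySem.Set.contains s y && p y && decide (y ≠ x))
            = (!PySem.Set.contains (PySem.Set.add s x) y && p y) := by
        intro y _
        rw [hadd, pv_contains_eq, pv_contains_eq]
        by_cases hyx : y = x
        · subst hyx; simp
        · simp [hyx, List.mem_append, Bool.and_comm]
      rw [List.filter_congr h2]
      have h1 : List.filter (fun y => !PySem.Set.contains s y && p y) [x]
          = if p x then [x] else [] := by
        by_cases hp : p x <;> simp [hx, hp]
      rw [h1, List.reverse_append]
      by_cases hp : p x <;> simp [hp]

theorem pvB_eq_spec (l : List Int) : cleanRestraints_alt l = pvSpec l := by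
  show (l.reverse.foldl (fun (st : List Int × PySem.Set Int) item =>
      if PySem.Set.contains st.2 item then st
      else ((if (l.foldl (fun d item => d.insert item (!(d.getD item false)))
                  PySem.Dict.empty).getD item false then st.1 ++ [item] else st.1),
            PySem.Set.add st.2 item))
      ([], PySem.Set.empty)).1.reverse = pvSpec l
  rw [pv_foldl_collect, List.nil_append, pv_collect_eq, List.reverse_reverse,
    List.reverse_reverse]
  unfold pvSpec
  apply List.filter_congr
  intro y _
  rw [pv_parity_getD]
  simp [PySem.Set.contains, PySem.Set.empty, PySem.Dict.empty, PySem.Dict.getD,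
    PySem.Dict.get?]

-- ===== VERDICT (by name: the statement is the Claim_ definition above) =====
theorem cleanRestraints_spec : Claim_equal_cleanRestraints := by
  intro l _
  unfold Spec_cleanRestraints
  rw [pvA_eq_spec, pvB_eq_spec]
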